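-- pv_equiv track=rewrite | github.com/asmpro/keepasspy | kpcli_impl.py | decode_random_pass_rule
-- ===== SOURCE A (Python) =====
-- import string
--
-- RANDOM_PASS_CHARS="{}{}-_".format(string.ascii_letters, string.digits)
--
-- RANDOM_PASS_LENGTH=20
--
-- def decode_random_pass_rule(rule):
--     """Decode random password rule according to this:
--        chars to use (a - alpha, n - numeric, s - special (special is follwed by allowed chars, ending with 's!'),
--        i.e.: ~l32ans_-!#$s! denoting 32 chars passlen consisting of alphanumeric chars and special chars '_-!#$')
--     """
--     if rule == "~": return RANDOM_PASS_CHARS, RANDOM_PASS_LENGTH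
--
--     state = 0
--     decoded_chars = ""
--     decoded_length = RANDOM_PASS_LENGTH
--     idx = -1
--     skip = 0
--     length_digits = ""
--     for c in rule:
--         idx += 1
--         # This is used just because Python does not support label/goto
--         while True:
--             if state == 0:
--                 if c == 'l': state = 3
--                 elif c == 'a': decoded_chars += string.ascii_letters
--                 elif c == 'n': decoded_chars += string.digits
--                 elif c == 's': state = 1
--             elif state == 1:
--                 if rule[idx:idx+2] == 's!':
--                     skip = 1
--                     state = 2
--                 else: decoded_chars += c
--             elif state == 2:
--                 skip -= 1
--                 if skip == 0: state = 0
--             elif state == 3: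
--                 # Find all the following digits
--                 if c in string.digits: length_digits += c
--                 else:
--                     state = 0
--                     continue
--             break
--
--     if length_digits != "": decoded_length = int(length_digits)
--     if decoded_chars == "": decoded_chars = RANDOM_PASS_CHARS
--
--     return decoded_chars, decoded_length
-- ===== SOURCE B (Python) =====
-- import string
--
-- RANDOM_PASS_CHARS = "{}{}-_".format(string.ascii_letters, string.digits)
--
-- RANDOM_PASS_LENGTH = 20
--
--
-- def decode_random_pass_rule(rule):
--     """Index-pointer parser: one outer loop over a position i, with inner
--     loops consuming a whole digit run after 'l' and a whole special section
--     after 's' (terminated by 's!'); digit runs accumulate globally."""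
--     if rule == "~":
--         return RANDOM_PASS_CHARS, RANDOM_PASS_LENGTH
--
--     chars = []
--     length_digits = []
--     i = 0
--     n = len(rule)
--     while i < n:
--         c = rule[i]
--         if c == 'l':
--             i += 1
--             while i < n and rule[i] in string.digits:
--                 length_digits.append(rule[i])
--                 i += 1
--         elif c == 'a':
--             chars.append(string.ascii_letters)
--             i += 1
--         elif c == 'n':
--             chars.append(string.digits)
--             i += 1
--         elif c == 's':
--             i += 1
--             while i < n and rule[i:i + 2] != 's!':
--                 chars.append(rule[i])
--                 i += 1
--             i += 2  # skip the 's!' terminator (or run off the end)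
--         else:
--             i += 1
--
--     charset = ''.join(chars) or RANDOM_PASS_CHARS
--     length = int(''.join(length_digits)) if length_digits else RANDOM_PASS_LENGTH
--     return charset, length
-- ===== Notes on version B (the rewrite author's own statement) =====
-- stated objective: simpler
-- what changed: Replaces A's per-character state machine with its label/goto-emulating inner 'while True' and state/idx/skip bookkeeping by an index-pointer parser: one outer loop over a position with dedicated inner loops that consume a whole digit run after 'l' and a whole special section up to the 's!' terminator after 's'.
import Mathlib
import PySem

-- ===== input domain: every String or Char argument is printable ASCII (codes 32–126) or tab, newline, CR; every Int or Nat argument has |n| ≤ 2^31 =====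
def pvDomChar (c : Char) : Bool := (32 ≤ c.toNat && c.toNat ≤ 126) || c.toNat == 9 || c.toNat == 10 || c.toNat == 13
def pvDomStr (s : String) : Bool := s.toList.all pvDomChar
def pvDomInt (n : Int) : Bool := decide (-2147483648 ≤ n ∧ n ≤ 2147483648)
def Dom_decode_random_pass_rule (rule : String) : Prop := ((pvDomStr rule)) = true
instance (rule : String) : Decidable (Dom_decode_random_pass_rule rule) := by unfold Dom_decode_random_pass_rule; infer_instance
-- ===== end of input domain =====

-- B replaces A's one-char-at-a-time state machine (with its label/goto inner while) by an
-- index-pointer parser with dedicated inner loops for digit runs and the 's…s!' section;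
-- objective: simpler. Return values are identical on every input.

def pvLetters : List Char := "abcdefghijklmnopqrstuvwxyzABCDEFGHIJKLMNOPQRSTUVWXYZ".toList
def pvDigits : List Char := "0123456789".toList
-- RANDOM_PASS_CHARS = ascii_letters + digits + "-_"
def pvRandomPassChars : List Char := pvLetters ++ pvDigits ++ ['-', '_']

-- ===== PORT A =====
-- the state-0 body of A's inner `while True`; the state-3 `continue` re-runs exactly this
def pvA_step0 (c : Char) (dc : List Char) : Int × List Char :=
  if c = 'l' then (3, dc)
  else if c = 'a' then (0, dc ++ pvLetters)
  else if c = 'n' then (0, dc ++ pvDigits)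
  else if c = 's' then (1, dc)
  else (0, dc)

-- one iteration of A's `for c in rule`; state = (state, decoded_chars, idx, skip, length_digits)
def pvA_step (ruleL : List Char) (s : Int × List Char × Int × Int × List Char) (c : Char) :
    Int × List Char × Int × Int × List Char :=
  match s with
  | (st, dc, idx, skip, ld) =>
    let idx := idx + 1
    if st = 0 then
      let p := pvA_step0 c dc
      (p.1, p.2, idx, skip, ld)
    else if st = 1 then
      if PySem.List.slice ruleL (some idx) (some (idx + 2)) = ['s', '!'] then
        (2, dc, idx, 1, ld)
      else (1, dc ++ [c], idx, skip, ld)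
    else if st = 2 then
      let skip := skip - 1
      if skip = 0 then (0, dc, idx, skip, ld) else (2, dc, idx, skip, ld)
    else -- state 3
      if c ∈ pvDigits then (st, dc, idx, skip, ld ++ [c])
      else -- `state = 0; continue`: the inner while re-runs on the same c in state 0
        let p := pvA_step0 c dc
        (p.1, p.2, idx, skip, ld)

def decode_random_pass_rule (rule : String) : String × Int :=
  if rule = "~" then (String.ofList pvRandomPassChars, 20)
  else
    let ruleL := rule.toList
    let s := ruleL.foldl (pvA_step ruleL) (0, [], -1, 0, [])
    let dc := s.2.1
    let ld := s.2.2.2.2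
    -- int(length_digits): ld is a nonempty digit string here, so ofChars? is always `some`
    let decodedLength : Int := if ld ≠ [] then (PySem.Int.ofChars? ld).getD 0 else 20
    let dc := if dc = [] then pvRandomPassChars else dc
    (String.ofList dc, decodedLength)

-- ===== PORT B =====
-- inner `while` after 'l': consume the run of digits (rule[i] indexing = head of the suffix)
def pvB_digits : List Char → List Char × List Char
  | [] => ([], [])
  | c :: rest =>
    if c ∈ pvDigits then
      let p := pvB_digits rest
      (c :: p.1, p.2)
    else ([], c :: rest)

-- inner `while` after 's': append chars until rule[i:i+2] == 's!' (the first two chars of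
-- the remaining suffix), then skip those two
def pvB_special : List Char → List Char × List Char
  | [] => ([], [])
  | c :: rest =>
    if c = 's' ∧ rest.head? = some '!' then ([], rest.tail)
    else
      let p := pvB_special rest
      (c :: p.1, p.2)

theorem pvB_digits_len (l : List Char) : (pvB_digits l).2.length ≤ l.length := by
  induction l with
  | nil => simp [pvB_digits]
  | cons c rest ih =>
    by_cases h : c ∈ pvDigits <;> simp [pvB_digits, h]; omega

theorem pvB_special_len (l : List Char) : (pvB_special l).2.length ≤ l.length := by
  induction l with
  | nil => simp [pvB_special]
  | cons c rest ih =>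
    by_cases h : c = 's' ∧ rest.head? = some '!' <;> simp [pvB_special, h]
    · omega
    · omega

-- B's outer `while i < n` loop, recursing on the remaining suffix
def pvB_go : List Char → List Char → List Char → List Char × List Char
  | [], chars, ld => (chars, ld)
  | c :: rest, chars, ld =>
    if c = 'l' then
      let p := pvB_digits rest
      pvB_go p.2 chars (ld ++ p.1)
    else if c = 'a' then pvB_go rest (chars ++ pvLetters) ld
    else if c = 'n' then pvB_go rest (chars ++ pvDigits) ld
    else if c = 's' then
      let p := pvB_special rest
      pvB_go p.2 (chars ++ p.1) ld
    else pvB_go rest chars ld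
termination_by l _ _ => l.length
decreasing_by
  · exact Nat.lt_succ_of_le (pvB_digits_len rest)
  · simp
  · simp
  · exact Nat.lt_succ_of_le (pvB_special_len rest)
  · simp

def decode_random_pass_rule_alt (rule : String) : String × Int :=
  if rule = "~" then (String.ofList pvRandomPassChars, 20)
  else
    let p := pvB_go rule.toList [] []
    let charset := if p.1 = [] then pvRandomPassChars else p.1
    let length : Int := if p.2 ≠ [] then (PySem.Int.ofChars? p.2).getD 0 else 20
    (String.ofList charset, length)

-- ===== PRECONDITION & SPEC =====
def Spec_decode_random_pass_rule (rule : String) (out : String × Int) : Prop := out = decode_random_pass_rule_alt rule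
instance (rule : String) (out : String × Int) : Decidable (Spec_decode_random_pass_rule rule out) := by unfold Spec_decode_random_pass_rule; infer_instance

-- ===== CLAIM (what is proved, stated in full; the proofs are below) =====
def Claim_equal_decode_random_pass_rule : Prop := ∀ (rule : String), Dom_decode_random_pass_rule rule → Spec_decode_random_pass_rule rule (decode_random_pass_rule rule)

-- ===== LEMMAS AND PROOFS =====

-- A's state machine re-expressed as a recursion on the remaining suffix (idx/skip eliminated:
-- rule[idx:idx+2] is the first two chars of the suffix, and skip is 1 whenever state is 2).
-- Returns the final (decoded_chars, length_digits).
def pvGoA : List Char → Int → List Char → List Char → List Char × List Char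
  | [], _, dc, ld => (dc, ld)
  | c :: rest, st, dc, ld =>
    if st = 0 then
      if c = 'l' then pvGoA rest 3 dc ld
      else if c = 'a' then pvGoA rest 0 (dc ++ pvLetters) ld
      else if c = 'n' then pvGoA rest 0 (dc ++ pvDigits) ld
      else if c = 's' then pvGoA rest 1 dc ld
      else pvGoA rest 0 dc ld
    else if st = 1 then
      if c = 's' ∧ rest.head? = some '!' then pvGoA rest 2 dc ld
      else pvGoA rest 1 (dc ++ [c]) ld
    else if st = 2 then pvGoA rest 0 dc ld
    else
      if c ∈ pvDigits then pvGoA rest 3 dc (ld ++ [c])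
      else -- the `continue`: same char, state 0
        if c = 'l' then pvGoA rest 3 dc ld
        else if c = 'a' then pvGoA rest 0 (dc ++ pvLetters) ld
        else if c = 'n' then pvGoA rest 0 (dc ++ pvDigits) ld
        else if c = 's' then pvGoA rest 1 dc ld
        else pvGoA rest 0 dc ld

theorem pvSliceCond (c : Char) (rest : List Char) :
    (c :: rest.take 1 = ['s', '!']) ↔ (c = 's' ∧ rest.head? = some '!') := by
  cases rest <;> simp

theorem pvBridgeA : ∀ (suffix pre : List Char) (st : Int) (dc : List Char) (skip : Int)
    (ld : List Char), (st = 0 ∨ st = 1 ∨ st = 3 ∨ (st = 2 ∧ skip = 1)) →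
    (let s := suffix.foldl (pvA_step (pre ++ suffix)) (st, dc, (pre.length : Int) - 1, skip, ld)
     (s.2.1, s.2.2.2.2)) = pvGoA suffix st dc ld := by
  intro suffix
  induction suffix with
  | nil => intro pre st dc skip ld _; simp [pvGoA]
  | cons c rest ih =>
    intro pre st dc skip ld hst
    have hidx : (pre.length : Int) - 1 + 1 = ((pre.length : Nat) : Int) := by omega
    have hslice : PySem.List.slice (pre ++ c :: rest) (some ((pre.length : Nat) : Int))
        (some (((pre.length : Nat) : Int) + 2)) = c :: rest.take 1 := by
      have h2 : (((pre.length : Nat) : Int) + 2) = (((pre.length + 2 : Nat)) : Int) := by push_cast; ring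
      rw [h2, PySem.List.slice_natCast]
      simp
    simp only [List.foldl_cons]
    have hfold : ∀ (st' : Int) (dc' : List Char) (skip' : Int) (ld' : List Char),
        (st' = 0 ∨ st' = 1 ∨ st' = 3 ∨ (st' = 2 ∧ skip' = 1)) →
        (let s := rest.foldl (pvA_step (pre ++ c :: rest)) (st', dc', ((pre ++ [c]).length : Int) - 1, skip', ld')
         (s.2.1, s.2.2.2.2)) = pvGoA rest st' dc' ld' := by
      intro st' dc' skip' ld' h
      have := ih (pre ++ [c]) st' dc' skip' ld' h
      rwa [List.append_assoc, List.singleton_append] at this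
    have hlen : ((pre ++ [c]).length : Int) - 1 = ((pre.length : Nat) : Int) := by
      simp
    rcases hst with h0 | h1 | h3 | ⟨h2, hsk⟩
    · -- state 0
      subst h0
      simp only [pvA_step, pvA_step0, hidx]
      by_cases hl : c = 'l'
      · simpa [pvGoA, hl, hlen] using hfold 3 dc skip ld (by simp)
      · by_cases ha : c = 'a'
        · simpa [pvGoA, hl, ha, hlen] using hfold 0 (dc ++ pvLetters) skip ld (by simp)
        · by_cases hn : c = 'n'
          · simpa [pvGoA, hl, ha, hn, hlen] using hfold 0 (dc ++ pvDigits) skip ld (by simp)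
          · by_cases hs : c = 's'
            · simpa [pvGoA, hl, ha, hn, hs, hlen] using hfold 1 dc skip ld (by simp)
            · simpa [pvGoA, hl, ha, hn, hs, hlen] using hfold 0 dc skip ld (by simp)
    · -- state 1
      subst h1
      simp only [pvA_step, hidx, hslice]
      by_cases hc : c = 's' ∧ rest.head? = some '!'
      · rw [if_pos ((pvSliceCond c rest).mpr hc)]
        simpa [pvGoA, hc, hlen] using hfold 2 dc 1 ld (by simp)
      · rw [if_neg (fun h => hc ((pvSliceCond c rest).mp h))]
        simpa [pvGoA, hc, hlen] using hfold 1 (dc ++ [c]) skip ld (by simp)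
    · -- state 3
      subst h3
      simp only [pvA_step, pvA_step0, hidx]
      by_cases hd : c ∈ pvDigits
      · simpa [pvGoA, hd, hlen] using hfold 3 dc skip (ld ++ [c]) (by simp)
      · by_cases hl : c = 'l'
        · simpa [pvGoA, hd, hl, hlen] using hfold 3 dc skip ld (by simp)
        · by_cases ha : c = 'a'
          · simpa [pvGoA, hd, hl, ha, hlen] using hfold 0 (dc ++ pvLetters) skip ld (by simp)
          · by_cases hn : c = 'n'
            · simpa [pvGoA, hd, hl, ha, hn, hlen] using hfold 0 (dc ++ pvDigits) skip ld (by simp)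
            · by_cases hs : c = 's'
              · simpa [pvGoA, hd, hl, ha, hn, hs, hlen] using hfold 1 dc skip ld (by simp)
              · simpa [pvGoA, hd, hl, ha, hn, hs, hlen] using hfold 0 dc skip ld (by simp)
    · -- state 2 (skip = 1)
      subst h2; subst hsk
      simp only [pvA_step, hidx]
      simpa [pvGoA, hlen] using hfold 0 dc 0 ld (by simp)

-- state 3 of A's machine = B's digit-run inner loop
theorem pvGoA_three (rest : List Char) : ∀ (dc ld : List Char),
    pvGoA rest 3 dc ld = pvGoA (pvB_digits rest).2 0 dc (ld ++ (pvB_digits rest).1) := by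
  induction rest with
  | nil => intro dc ld; simp [pvGoA, pvB_digits]
  | cons c rest ih =>
    intro dc ld
    by_cases hd : c ∈ pvDigits
    · rw [show pvB_digits (c :: rest) = (c :: (pvB_digits rest).1, (pvB_digits rest).2) by
        simp [pvB_digits, hd]]
      have : pvGoA (c :: rest) 3 dc ld = pvGoA rest 3 dc (ld ++ [c]) := by simp [pvGoA, hd]
      rw [this, ih]; simp
    · rw [show pvB_digits (c :: rest) = ([], c :: rest) by simp [pvB_digits, hd]]
      simp only [List.append_nil]
      -- both sides take the same state-0 branch on c
      simp [pvGoA, hd]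

-- state 1 of A's machine = B's special-section inner loop (state 2 consumes the '!')
theorem pvGoA_one (rest : List Char) : ∀ (dc ld : List Char),
    pvGoA rest 1 dc ld = pvGoA (pvB_special rest).2 0 (dc ++ (pvB_special rest).1) ld := by
  induction rest with
  | nil => intro dc ld; simp [pvGoA, pvB_special]
  | cons c rest ih =>
    intro dc ld
    by_cases h : c = 's' ∧ rest.head? = some '!'
    · obtain ⟨hc, hh⟩ := h
      cases rest with
      | nil => simp at hh
      | cons d r =>
        simp at hh
        subst hc; subst hh
        rw [show pvB_special ('s' :: '!' :: r) = ([], r) by simp [pvB_special]]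
        simp [pvGoA]
    · rw [show pvB_special (c :: rest) = (c :: (pvB_special rest).1, (pvB_special rest).2) by
        simp [pvB_special, h]]
      have : pvGoA (c :: rest) 1 dc ld = pvGoA rest 1 (dc ++ [c]) ld := by
        simp [pvGoA, h]
      rw [this, ih]; simp

-- state 0 of A's machine = B's outer loop
theorem pvGoA_zero : ∀ (l dc ld : List Char), pvGoA l 0 dc ld = pvB_go l dc ld := by
  intro l dc ld
  induction l, dc, ld using pvB_go.induct with
  | case1 chars ld => simp [pvGoA, pvB_go]
  | case2 rest chars ld p ih =>
    rw [show pvGoA ('l' :: rest) 0 chars ld = pvGoA rest 3 chars ld by simp [pvGoA]]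
    rw [pvGoA_three, ih, pvB_go]; simp; rfl
  | case3 rest chars ld ha ih =>
    rw [show pvGoA ('a' :: rest) 0 chars ld = pvGoA rest 0 (chars ++ pvLetters) ld by
      simp [pvGoA]]
    rw [ih, pvB_go]; simp
  | case4 rest chars ld hn1 hn2 ih =>
    rw [show pvGoA ('n' :: rest) 0 chars ld = pvGoA rest 0 (chars ++ pvDigits) ld by
      simp [pvGoA]]
    rw [ih, pvB_go]; simp
  | case5 rest chars ld p h1 h2 h3 ih =>
    rw [show pvGoA ('s' :: rest) 0 chars ld = pvGoA rest 1 chars ld by simp [pvGoA]]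
    rw [pvGoA_one, ih, pvB_go]; simp; rfl
  | case6 c rest chars ld hl ha hn hs ih =>
    rw [show pvGoA (c :: rest) 0 chars ld = pvGoA rest 0 chars ld by simp [pvGoA, hl, ha, hn, hs]]
    rw [ih, pvB_go]; simp [hl, ha, hn, hs]

-- ===== VERDICT (by name: the statement is the Claim_ definition above) =====
theorem decode_random_pass_rule_spec : Claim_equal_decode_random_pass_rule := by
  intro rule _
  unfold Spec_decode_random_pass_rule decode_random_pass_rule decode_random_pass_rule_alt
  by_cases h : rule = "~"
  · simp [h]
  · simp only [h, if_false]
    have hb := pvBridgeA rule.toList [] 0 [] 0 [] (by simp)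
    simp only [List.nil_append, List.length_nil, Nat.cast_zero, zero_sub] at hb
    rw [pvGoA_zero] at hb
    have h1 : (rule.toList.foldl (pvA_step rule.toList) (0, [], -1, 0, [])).2.1
        = (pvB_go rule.toList [] []).1 := congrArg Prod.fst hb
    have h2 : (rule.toList.foldl (pvA_step rule.toList) (0, [], -1, 0, [])).2.2.2.2
        = (pvB_go rule.toList [] []).2 := congrArg Prod.snd hb
    simp [h1, h2]
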